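-- pv_equiv track=rewrite | github.com/Nicefree19/14.AI_Agent | scripts/telegram/skills/generation_skills.py | _build_category_sheet
-- ===== SOURCE A (Python) =====
-- from typing import Any, Dict, List, Optional
--
-- def _build_category_sheet(
--     issues: List[Dict], headers: List[str]
-- ) -> Dict[str, tuple]:
--     """카테고리별 시트 구성."""
--     categories: Dict[str, List[Dict]] = {}
--     for issue in issues:
--         cat = issue.get("category", "미분류")
--         categories.setdefault(cat, []).append(issue)
--
--     result = {}
--     for cat, cat_issues in sorted(categories.items()):
--         sheet_name = f"분류_{cat}"[:31]
--         rows = []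
--         for issue in _sort_issues(cat_issues):
--             rows.append([
--                 issue.get("issue_id", ""),
--                 issue.get("title", ""),
--                 issue.get("category", ""),
--                 issue.get("priority", ""),
--                 issue.get("status", ""),
--                 issue.get("owner", ""),
--                 issue.get("due_date", ""),
--                 issue.get("created", ""),
--             ])
--         result[sheet_name] = (headers, rows)
--
--     return result
--
-- def _sort_issues(issues: List[Dict]) -> List[Dict]:
--     """이슈를 우선순위 → 마감일 순으로 정렬."""
--     priority_order = {"critical": 0, "high": 1, "medium": 2, "normal": 3, "low": 4}
--     return sorted(
--         issues,
--         key=lambda x: (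
--             priority_order.get(x.get("priority", "medium").lower(), 5),
--             x.get("due_date", "9999-12-31"),
--         ),
--     )
-- ===== SOURCE B (Python) =====
-- def _build_category_sheet(issues, headers):
--     """Sorted distinct categories + per-category filter instead of dict-of-lists grouping."""
--     priority_order = {"critical": 0, "high": 1, "medium": 2, "normal": 3, "low": 4}
--     fields = ["issue_id", "title", "category", "priority", "status", "owner", "due_date", "created"]
--     result = {}
--     for cat in sorted({i.get("category", "미분류") for i in issues}):
--         members = [i for i in issues if i.get("category", "미분류") == cat]
--         members.sort(key=lambda x: (
--             priority_order.get(x.get("priority", "medium").lower(), 5),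
--             x.get("due_date", "9999-12-31"),
--         ))
--         result[("분류_" + cat)[:31]] = (headers, [[i.get(f, "") for f in fields] for i in members])
--     return result
-- ===== Notes on version B (the rewrite author's own statement) =====
-- stated objective: alternative
-- what changed: A builds a dict-of-lists by a setdefault/append grouping pass and then sorts its items; B computes the sorted set of distinct categories and, for each one, filters the input and sorts just that sublist - no grouping dict, no row accumulator (rows come from a comprehension over a field-name list).
import Mathlib
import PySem

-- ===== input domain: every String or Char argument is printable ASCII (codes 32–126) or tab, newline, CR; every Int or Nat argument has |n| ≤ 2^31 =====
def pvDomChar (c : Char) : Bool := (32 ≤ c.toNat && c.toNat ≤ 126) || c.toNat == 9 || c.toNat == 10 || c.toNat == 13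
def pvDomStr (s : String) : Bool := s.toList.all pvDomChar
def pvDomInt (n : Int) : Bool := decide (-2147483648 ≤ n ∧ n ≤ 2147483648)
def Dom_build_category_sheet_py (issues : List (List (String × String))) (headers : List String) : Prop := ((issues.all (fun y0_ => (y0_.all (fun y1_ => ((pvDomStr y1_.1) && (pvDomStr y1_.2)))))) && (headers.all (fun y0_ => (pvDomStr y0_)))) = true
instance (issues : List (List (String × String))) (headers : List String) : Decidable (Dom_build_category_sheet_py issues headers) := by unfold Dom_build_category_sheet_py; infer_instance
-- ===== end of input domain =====

-- B replaces A's dict-of-lists grouping pass by "sorted distinct categories, then a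
-- filter per category" (objective: alternative decomposition, same results).

-- ===== PORT A =====
-- shared vocabulary of both ports: `issue.get(k, default)` on an issue dict, the
-- category / priority / due-date sort keys of the original, and the sheet name
def pvGet (i : List (String × String)) (k d : String) : String :=
  PySem.Dict.getD (PySem.Dict.mk i) k d

def pvKc (i : List (String × String)) : String := pvGet i "category" "미분류"

def pvPrioOrder : PySem.Dict String Int :=
  PySem.Dict.mk [("critical", 0), ("high", 1), ("medium", 2), ("normal", 3), ("low", 4)]

def pvKeyP (x : List (String × String)) : Int :=
  PySem.Dict.getD pvPrioOrder (PySem.Str.lower (pvGet x "priority" "medium")) 5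

def pvKeyD (x : List (String × String)) : String := pvGet x "due_date" "9999-12-31"

def pvSheet (cat : String) : String := PySem.Str.slice ("분류_" ++ cat) none (some 31)

-- _sort_issues: sorted(issues, key=lambda x: (priority_rank, due_date))
def pvSortIssues (issues : List (List (String × String))) : List (List (String × String)) :=
  PySem.List.sorted2 issues pvKeyP pvKeyD

def build_category_sheet_py (issues : List (List (String × String))) (headers : List String) :
    List (String × List String × List (List String)) :=
  -- categories.setdefault(cat, []).append(issue)  ==  d[cat] = d.get(cat, []) + [issue]
  let categories : PySem.Dict String (List (List (String × String))) :=
    issues.foldl (fun d issue => d.modify (pvKc issue) [] (fun l => l ++ [issue])) PySem.Dict.empty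
  -- sorted(categories.items()): dict keys are distinct, so Python's tuple comparison
  -- only ever reads the first component — exact as a sort by fst
  let result : PySem.Dict String (List String × List (List String)) :=
    (PySem.List.sorted categories.items Prod.fst).foldl (fun result p =>
      let rows := (pvSortIssues p.2).foldl (fun rows issue =>
        rows ++ [[pvGet issue "issue_id" "", pvGet issue "title" "", pvGet issue "category" "",
                  pvGet issue "priority" "", pvGet issue "status" "", pvGet issue "owner" "",
                  pvGet issue "due_date" "", pvGet issue "created" ""]]) []
      result.insert (pvSheet p.1) (headers, rows)) PySem.Dict.empty
  result.items

-- ===== PORT B =====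
def pvFields : List String :=
  ["issue_id", "title", "category", "priority", "status", "owner", "due_date", "created"]

def build_category_sheet_py_alt (issues : List (List (String × String))) (headers : List String) :
    List (String × List String × List (List String)) :=
  let result : PySem.Dict String (List String × List (List String)) :=
    (PySem.List.sorted (PySem.Set.ofList (issues.map pvKc)) (fun c => c)).foldl (fun result cat =>
      let members := PySem.List.sorted2 (issues.filter (fun i => pvKc i == cat)) pvKeyP pvKeyD
      result.insert (pvSheet cat)
        (headers, members.map (fun i => pvFields.map (fun f => pvGet i f ""))))
      PySem.Dict.empty
  result.items

-- ===== PRECONDITION & SPEC =====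
def Spec_build_category_sheet_py (issues : List (List (String × String))) (headers : List String) (out : List (String × List String × List (List String))) : Prop := out = build_category_sheet_py_alt issues headers
instance (issues : List (List (String × String))) (headers : List String) (out : List (String × List String × List (List String))) : Decidable (Spec_build_category_sheet_py issues headers out) := by unfold Spec_build_category_sheet_py; infer_instance

-- ===== CLAIM (what is proved, stated in full; the proofs are below) =====
def Claim_equal_build_category_sheet_py : Prop := ∀ (issues : List (List (String × String))) (headers : List String), Dom_build_category_sheet_py issues headers → Spec_build_category_sheet_py issues headers (build_category_sheet_py issues headers)

-- ===== LEMMAS AND PROOFS =====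

-- A's grouping dict, as items: the distinct categories in first-occurrence order,
-- each paired with the input-order sublist of issues of that category.
theorem pv_items (issues : List (List (String × String))) :
    (issues.foldl (fun d issue => d.modify (pvKc issue) [] (fun l => l ++ [issue]))
        PySem.Dict.empty).items
      = (PySem.Set.ofList (issues.map pvKc)).map
          (fun c => (c, issues.filter (fun i => pvKc i == c))) := by
  set D := issues.foldl (fun d issue => d.modify (pvKc issue) [] (fun l => l ++ [issue]))
        PySem.Dict.empty with hD
  have hk : D.keys = PySem.Set.ofList (issues.map pvKc) := by
    rw [hD, PySem.Dict.keys_foldl_modify_key issues pvKc []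
      (fun _ issue => (fun l => l ++ [issue])) PySem.Dict.empty]
    rfl
  have hnd : D.keys.Nodup := by
    rw [hk]; exact PySem.Set.nodup_ofList _
  have hget : ∀ c, D.getD c [] = issues.filter (fun i => pvKc i == c) := by
    intro c
    have h1 : D = (issues.map (fun i => (pvKc i, i))).foldl
        (fun d p => d.modify p.1 [] (fun l => l ++ [p.2])) PySem.Dict.empty := by
      rw [hD, List.foldl_map]
    rw [h1, PySem.Dict.getD_foldl_modify_append]
    simp [List.filter_map, Function.comp_def]
  rw [PySem.Dict.items_eq_map_keys D hnd [], hk]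
  exact List.map_congr_left (fun c _ => by rw [hget c])


-- sorting the items by their (distinct) keys = mapping over the sorted key set
theorem pv_sorted_items (issues : List (List (String × String))) :
    PySem.List.sorted
        ((PySem.Set.ofList (issues.map pvKc)).map
          (fun c => (c, issues.filter (fun i => pvKc i == c)))) Prod.fst
      = (PySem.List.sorted (PySem.Set.ofList (issues.map pvKc)) (fun c => c)).map
          (fun c => (c, issues.filter (fun i => pvKc i == c))) := by
  apply PySem.List.sorted_eq_of_perm_of_pairwise_lt
  · exact (PySem.List.sorted_perm _ _ _).map _
  · exact List.pairwise_map.mpr (by simpa using PySem.List.sorted_ofList_pairwise_lt (issues.map pvKc))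

set_option maxHeartbeats 800000 in
theorem pv_main (issues : List (List (String × String))) (headers : List String) :
    build_category_sheet_py issues headers = build_category_sheet_py_alt issues headers := by
  show (List.foldl
        (fun result p =>
          result.insert (pvSheet p.1) (headers,
            List.foldl
              (fun rows issue =>
                rows ++
                  [[pvGet issue "issue_id" "", pvGet issue "title" "", pvGet issue "category" "",
                    pvGet issue "priority" "", pvGet issue "status" "", pvGet issue "owner" "",
                    pvGet issue "due_date" "", pvGet issue "created" ""]])
              [] (pvSortIssues p.2)))
        PySem.Dict.empty
        (PySem.List.sorted
          (List.foldl (fun d issue => d.modify (pvKc issue) [] fun l => l ++ [issue])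
            PySem.Dict.empty issues).items Prod.fst)).items =
      (List.foldl
        (fun result cat =>
          result.insert (pvSheet cat) (headers,
            List.map (fun i => List.map (fun f => pvGet i f "") pvFields)
              (PySem.List.sorted2 (List.filter (fun i => pvKc i == cat) issues) pvKeyP pvKeyD)))
        PySem.Dict.empty
        (PySem.List.sorted (PySem.Set.ofList (List.map pvKc issues)) fun c => c)).items
  rw [pv_items, pv_sorted_items, List.foldl_map]
  congr 1
  apply PySem.List.foldl_congr_mem
  intro acc c _
  rw [PySem.List.foldl_append_singleton_eq_map]
  rfl

-- ===== VERDICT (by name: the statement is the Claim_ definition above) =====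
theorem build_category_sheet_py_spec : Claim_equal_build_category_sheet_py := by
  intro issues headers _
  exact pv_main issues headers
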